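-- pv_equiv track=rewrite | github.com/LaVie-environment/GraphAlgorithms | Holiday/src/holidays.py | find_unvisited_cities
-- ===== SOURCE A (Python) =====
-- from collections import defaultdict
--
-- def find_unvisited_cities(desired_places, routes):
--     # Create sets for easier lookup
--     desired_places_set = set(desired_places)
--
--     # Build graph from routes
--     graph = defaultdict(set)
--     for route in routes.values():
--         for i in range(len(route) - 1):
--             city1, city2 = route[i], route[i + 1]
--             graph[city1].add(city2)
--             graph[city2].add(city1)
--
--     # Find unvisited cities
--     unvisited_cities = []
--     for place in desired_places_set:
--         if place not in graph:
--             unvisited_cities.append(place)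
--         else:
--             visited_neighbors = set()
--             for neighbor in graph[place]:
--                 visited_neighbors.add(neighbor)
--
--             if len(visited_neighbors) == 0:
--                 unvisited_cities.append(place)
--             elif len(graph[place]) != len(visited_neighbors):
--                 unvisited_cities.append(place)
--
--     return sorted(unvisited_cities)
-- ===== SOURCE B (Python) =====
-- def find_unvisited_cities(desired_places, routes):
--     # A desired city is "unvisited" exactly when it appears in no route of
--     # length >= 2 (only those routes contribute nodes to A's graph).
--     seen = set()
--     for route in routes.values():
--         if len(route) >= 2:
--             seen.update(route)
--     return sorted(set(desired_places) - seen)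
-- ===== Notes on version B (the rewrite author's own statement) =====
-- stated objective: simpler
-- what changed: B drops the adjacency-graph construction and the dead neighbour-copy branch entirely, keeping only a flat set of cities appearing in routes of length >= 2 and returning the sorted set difference.
import Mathlib
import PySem

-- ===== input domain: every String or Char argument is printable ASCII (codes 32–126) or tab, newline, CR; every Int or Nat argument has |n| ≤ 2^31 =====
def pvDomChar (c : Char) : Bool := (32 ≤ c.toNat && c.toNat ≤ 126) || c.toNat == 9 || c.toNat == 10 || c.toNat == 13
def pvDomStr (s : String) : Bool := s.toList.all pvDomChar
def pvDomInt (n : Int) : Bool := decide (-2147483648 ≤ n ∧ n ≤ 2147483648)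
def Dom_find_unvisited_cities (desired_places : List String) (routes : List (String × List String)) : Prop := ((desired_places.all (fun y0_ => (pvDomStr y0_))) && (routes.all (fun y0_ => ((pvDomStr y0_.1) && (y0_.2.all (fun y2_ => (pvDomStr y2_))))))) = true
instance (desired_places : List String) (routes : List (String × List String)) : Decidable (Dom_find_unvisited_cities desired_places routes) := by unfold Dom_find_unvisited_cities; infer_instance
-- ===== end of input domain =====

-- B replaces A's adjacency-graph construction (whose else branch is dead code) by a
-- flat set of cities appearing in routes of length >= 2 and a sorted set difference: simpler, same result.
-- ===== PORT A =====
-- Literal port of A: build the adjacency graph (defaultdict(set)) from consecutive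
-- route pairs, then scan set(desired_places), with the same dead-copy else branch.
def find_unvisited_cities (desired_places : List String) (routes : List (String × List String)) : List String :=
  let desired_places_set : PySem.Set String := PySem.Set.ofList desired_places
  let graph : PySem.Dict String (PySem.Set String) :=
    routes.foldl (fun g kv =>
      let route := kv.2
      (PySem.List.pyRange 0 ((route.length : Int) - 1) 1).foldl (fun g i =>
        let city1 := PySem.List.pyGetD route i ""
        let city2 := PySem.List.pyGetD route (i + 1) ""
        let g := g.modify city1 PySem.Set.empty (fun s => PySem.Set.add s city2)
        g.modify city2 PySem.Set.empty (fun s => PySem.Set.add s city1)) g)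
      PySem.Dict.empty
  let unvisited_cities : List String :=
    desired_places_set.foldl (fun acc place =>
      if ¬ (graph.contains place) then acc ++ [place]
      else
        let nbrs := graph.getD place PySem.Set.empty
        let visited_neighbors : PySem.Set String :=
          nbrs.foldl (fun v n => PySem.Set.add v n) PySem.Set.empty
        if PySem.Set.len visited_neighbors = 0 then acc ++ [place]
        else if PySem.Set.len nbrs ≠ PySem.Set.len visited_neighbors then acc ++ [place]
        else acc) []
  PySem.List.sorted unvisited_cities (fun x => x) false

-- ===== PORT B =====
-- Port of B: one appearance set over routes of length >= 2, sorted set difference.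
def find_unvisited_cities_alt (desired_places : List String) (routes : List (String × List String)) : List String :=
  let seen : PySem.Set String :=
    routes.foldl (fun s kv =>
      if 2 ≤ kv.2.length then PySem.Set.update s kv.2 else s) PySem.Set.empty
  PySem.List.sorted (PySem.Set.diff (PySem.Set.ofList desired_places) seen) (fun x => x) false

-- ===== PRECONDITION & SPEC =====
def Spec_find_unvisited_cities (desired_places : List String) (routes : List (String × List String)) (out : List String) : Prop := out = find_unvisited_cities_alt desired_places routes
instance (desired_places : List String) (routes : List (String × List String)) (out : List String) : Decidable (Spec_find_unvisited_cities desired_places routes out) := by unfold Spec_find_unvisited_cities; infer_instance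

-- ===== CLAIM (what is proved, stated in full; the proofs are below) =====
def Claim_equal_find_unvisited_cities : Prop := ∀ (desired_places : List String) (routes : List (String × List String)), Dom_find_unvisited_cities desired_places routes → Spec_find_unvisited_cities desired_places routes (find_unvisited_cities desired_places routes)

-- ===== LEMMAS AND PROOFS =====

-- Helpers naming the sub-computations of the two ports (definitionally equal to them).
def pvEdgeStep (route : List String) (g : PySem.Dict String (PySem.Set String)) (i : Int) :
    PySem.Dict String (PySem.Set String) :=
  (g.modify (PySem.List.pyGetD route i "") PySem.Set.empty
      (fun s => PySem.Set.add s (PySem.List.pyGetD route (i + 1) ""))).modify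
    (PySem.List.pyGetD route (i + 1) "") PySem.Set.empty
    (fun s => PySem.Set.add s (PySem.List.pyGetD route i ""))

def pvRouteStep (g : PySem.Dict String (PySem.Set String)) (kv : String × List String) :
    PySem.Dict String (PySem.Set String) :=
  (PySem.List.pyRange 0 ((kv.2.length : Int) - 1) 1).foldl (pvEdgeStep kv.2) g

def pvGraph (routes : List (String × List String)) : PySem.Dict String (PySem.Set String) :=
  routes.foldl pvRouteStep PySem.Dict.empty

def pvSeen (routes : List (String × List String)) : PySem.Set String :=
  routes.foldl (fun s kv => if 2 ≤ kv.2.length then PySem.Set.update s kv.2 else s) PySem.Set.empty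

def pvBody (g : PySem.Dict String (PySem.Set String)) (acc : List String) (place : String) :
    List String :=
  if ¬ (g.contains place) then acc ++ [place]
  else
    let nbrs := g.getD place PySem.Set.empty
    let visited_neighbors : PySem.Set String :=
      nbrs.foldl (fun v n => PySem.Set.add v n) PySem.Set.empty
    if PySem.Set.len visited_neighbors = 0 then acc ++ [place]
    else if PySem.Set.len nbrs ≠ PySem.Set.len visited_neighbors then acc ++ [place]
    else acc

-- "city k appears in some route of length >= 2"
def pvTouch (routes : List (String × List String)) (k : String) : Prop :=
  ∃ kv ∈ routes, 2 ≤ kv.2.length ∧ k ∈ kv.2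

theorem pvA_unfold (dp : List String) (r : List (String × List String)) :
    find_unvisited_cities dp r =
      PySem.List.sorted ((PySem.Set.ofList dp).foldl (pvBody (pvGraph r)) []) (fun x => x) false := rfl

theorem pvB_unfold (dp : List String) (r : List (String × List String)) :
    find_unvisited_cities_alt dp r =
      PySem.List.sorted ((PySem.Set.ofList dp).filter (fun x => !(PySem.Set.contains (pvSeen r) x)))
        (fun x => x) false := rfl

theorem pvSeen_contains (k : String) (routes : List (String × List String)) :
    ∀ s : PySem.Set String,
      PySem.Set.contains (routes.foldl (fun s kv => if 2 ≤ kv.2.length then PySem.Set.update s kv.2 else s) s) k = true ↔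
        PySem.Set.contains s k = true ∨ pvTouch routes k := by
  induction routes with
  | nil => intro s; simp [pvTouch]
  | cons kv rest ih =>
    intro s
    simp only [List.foldl_cons]
    rw [ih]
    by_cases h : 2 ≤ kv.2.length
    · simp only [if_pos h]
      simp [h, pvTouch, PySem.Set.mem_update]
      tauto
    · simp only [if_neg h]
      simp [h, pvTouch]

theorem pvEdge_contains (route : List String) (g : PySem.Dict String (PySem.Set String)) (i : Int) (k : String) :
    (pvEdgeStep route g i).contains k = true ↔
      g.contains k = true ∨ k = PySem.List.pyGetD route i "" ∨ k = PySem.List.pyGetD route (i + 1) "" := by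
  simp [pvEdgeStep, PySem.Dict.contains_modify, beq_iff_eq]
  tauto

theorem pvRangeFold_contains (route : List String) (k : String) (m : Nat) :
    ∀ g : PySem.Dict String (PySem.Set String),
      ((List.range m).foldl (fun g (i : Nat) => pvEdgeStep route g (i : Int)) g).contains k = true ↔
        g.contains k = true ∨ ∃ i < m, k = route.getD i "" ∨ k = route.getD (i + 1) "" := by
  induction m with
  | zero => intro g; simp
  | succ m ih =>
    intro g
    rw [List.range_succ, List.foldl_append]
    simp only [List.foldl_cons, List.foldl_nil]
    rw [pvEdge_contains, ih]
    have hcast : ((m : Int) + 1) = ((m + 1 : Nat) : Int) := by push_cast; ring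
    rw [hcast, PySem.List.pyGetD_natCast, PySem.List.pyGetD_natCast]
    constructor
    · rintro ((h | ⟨i, hi, h⟩) | h | h)
      · exact Or.inl h
      · exact Or.inr ⟨i, by omega, h⟩
      · exact Or.inr ⟨m, by omega, Or.inl h⟩
      · exact Or.inr ⟨m, by omega, Or.inr h⟩
    · rintro (h | ⟨i, hi, h⟩)
      · exact Or.inl (Or.inl h)
      · rcases Nat.lt_succ_iff_lt_or_eq.mp hi with hi' | rfl
        · exact Or.inl (Or.inr ⟨i, hi', h⟩)
        · rcases h with h | h
          · exact Or.inr (Or.inl h)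
          · exact Or.inr (Or.inr h)

theorem pvRouteStep_contains (g : PySem.Dict String (PySem.Set String)) (kv : String × List String) (k : String) :
    (pvRouteStep g kv).contains k = true ↔
      g.contains k = true ∨ (2 ≤ kv.2.length ∧ k ∈ kv.2) := by
  unfold pvRouteStep
  by_cases h : 2 ≤ kv.2.length
  · have h1 : ((kv.2.length : Int) - 1) = ((kv.2.length - 1 : Nat) : Int) := by
      omega
    rw [h1, PySem.List.pyRange_zero_natCast, List.foldl_map, pvRangeFold_contains]
    have hmem : (∃ i < kv.2.length - 1, k = kv.2.getD i "" ∨ k = kv.2.getD (i + 1) "") ↔ k ∈ kv.2 := by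
      constructor
      · rintro ⟨i, hi, h' | h'⟩
        · rw [h', List.getD_eq_getElem _ _ (by omega)]; exact List.getElem_mem _
        · rw [h', List.getD_eq_getElem _ _ (by omega)]; exact List.getElem_mem _
      · intro hk
        rcases List.mem_iff_getElem.mp hk with ⟨j, hj, hkj⟩
        by_cases hj' : j < kv.2.length - 1
        · exact ⟨j, hj', Or.inl (by rw [List.getD_eq_getElem _ _ hj, hkj])⟩
        · refine ⟨j - 1, by omega, Or.inr ?_⟩
          have : j - 1 + 1 = j := by omega
          rw [this, List.getD_eq_getElem _ _ hj, hkj]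
    rw [hmem]
    simp [h]
  · have h1 : PySem.List.pyRange 0 ((kv.2.length : Int) - 1) 1 = [] :=
      PySem.List.pyRange_one_eq_nil (by omega)
    rw [h1]
    simp [h]

theorem pvGraph_contains (k : String) (routes : List (String × List String)) :
    ∀ g : PySem.Dict String (PySem.Set String),
      (routes.foldl pvRouteStep g).contains k = true ↔ g.contains k = true ∨ pvTouch routes k := by
  induction routes with
  | nil => intro g; simp [pvTouch]
  | cons kv rest ih =>
    intro g
    simp only [List.foldl_cons]
    rw [ih, pvRouteStep_contains]
    simp [pvTouch]
    tauto

-- Invariant: every stored neighbour set is duplicate-free, and nonempty where the key exists.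
def pvGood (g : PySem.Dict String (PySem.Set String)) : Prop :=
  ∀ k, (g.getD k PySem.Set.empty).Nodup ∧ (g.contains k = true → g.getD k PySem.Set.empty ≠ [])

theorem pvAdd_ne_nil {α : Type} [BEq α] [LawfulBEq α] (s : PySem.Set α) (x : α) :
    PySem.Set.add s x ≠ [] := by
  rw [PySem.Set.add_eq_ite]
  split
  · rename_i h; exact List.ne_nil_of_mem h
  · simp

theorem pvGood_modify (g : PySem.Dict String (PySem.Set String)) (hg : pvGood g) (c1 c2 : String) :
    pvGood (g.modify c1 PySem.Set.empty (fun s => PySem.Set.add s c2)) := by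
  intro k
  rw [PySem.Dict.getD_modify, PySem.Dict.contains_modify]
  by_cases h : k = c1
  · subst h
    rw [if_pos rfl]
    exact ⟨PySem.Set.nodup_add _ _ (hg k).1, fun _ => pvAdd_ne_nil _ _⟩
  · rw [if_neg h]
    refine ⟨(hg k).1, fun hc => (hg k).2 ?_⟩
    simpa [beq_iff_eq, h] using hc

theorem pvGood_foldl {β : Type} (f : PySem.Dict String (PySem.Set String) → β → PySem.Dict String (PySem.Set String))
    (hf : ∀ g b, pvGood g → pvGood (f g b)) (l : List β) :
    ∀ g, pvGood g → pvGood (l.foldl f g) := by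
  induction l with
  | nil => intro g hg; exact hg
  | cons b rest ih => intro g hg; exact ih _ (hf g b hg)

theorem pvGood_empty : pvGood PySem.Dict.empty := by
  intro k
  simp [PySem.Dict.getD_empty, PySem.Dict.contains_empty, PySem.Set.empty]

theorem pvGood_graph (routes : List (String × List String)) : pvGood (pvGraph routes) := by
  refine pvGood_foldl pvRouteStep (fun g kv hg => ?_) routes PySem.Dict.empty pvGood_empty
  refine pvGood_foldl (pvEdgeStep kv.2) (fun g i hg => ?_) _ g hg
  exact pvGood_modify _ (pvGood_modify _ hg _ _) _ _

theorem pvBody_eq (g : PySem.Dict String (PySem.Set String)) (hg : pvGood g) :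
    pvBody g = fun acc place => if (!(g.contains place)) = true then acc ++ [place] else acc := by
  funext acc place
  unfold pvBody
  by_cases h : g.contains place = true
  · have hnbrs := hg place
    have hne : g.getD place PySem.Set.empty ≠ [] := hnbrs.2 h
    have hvis : (g.getD place PySem.Set.empty).foldl (fun v n => PySem.Set.add v n) PySem.Set.empty
        = g.getD place PySem.Set.empty := by
      have hr : (g.getD place PySem.Set.empty).foldl (fun v n => PySem.Set.add v n) PySem.Set.empty
          = PySem.Set.ofList (g.getD place PySem.Set.empty) := rfl
      rw [hr]
      exact PySem.Set.ofList_eq_self_of_nodup _ hnbrs.1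
    have hlen : PySem.Set.len (g.getD place PySem.Set.empty) ≠ 0 := by
      have hr : PySem.Set.len (g.getD place PySem.Set.empty)
          = ((g.getD place PySem.Set.empty).length : Int) := rfl
      rw [hr]
      intro hc
      exact hne (List.length_eq_zero_iff.mp (by exact_mod_cast hc))
    simp only [h, not_true_eq_false, if_false, hvis, Bool.not_true, Bool.false_eq_true]
    rw [if_neg hlen, if_neg (fun hx => hx rfl)]
  · simp [h]

-- ===== VERDICT (by name: the statement is the Claim_ definition above) =====
theorem find_unvisited_cities_spec : Claim_equal_find_unvisited_cities := by
  intro dp r _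
  unfold Spec_find_unvisited_cities
  rw [pvA_unfold, pvB_unfold, pvBody_eq _ (pvGood_graph r),
      PySem.List.foldl_append_if (fun place => !(pvGraph r).contains place) (fun x => x)]
  have hpred : (fun place => !(pvGraph r).contains place) = (fun x => !(PySem.Set.contains (pvSeen r) x)) := by
    funext x
    have h1 := pvGraph_contains x r PySem.Dict.empty
    have h2 := pvSeen_contains x r PySem.Set.empty
    simp [PySem.Dict.contains_empty] at h1
    simp [PySem.Set.empty] at h2
    have hc : (pvGraph r).contains x = PySem.Set.contains (pvSeen r) x := by
      rw [Bool.eq_iff_iff, PySem.Set.contains_iff]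
      unfold pvGraph pvSeen
      exact h1.trans h2.symm
    rw [hc]
  simp [hpred]
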